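-- pv_equiv track=rewrite | github.com/pengyizhou/FD-Bench | benchmark/benchmarking.py | find_ai_speaks_idx
-- ===== SOURCE A (Python) =====
-- def find_ai_speaks_idx(ai_time_starts, user_time_starts):
--     """
--     For each time in ai_time_starts, find the index i in user_time_starts
--     such that user_time_starts[i] < ai_time < user_time_starts[i+1].
--     If ai_time is greater than or equal to the last element in user_time_starts,
--     assign the index of the last element.
--
--     Parameters:
--         ai_time_starts (list of numbers): List of AI time stamps.
--         user_time_starts (list of numbers): List of user time stamps (assumed sorted).
--
--     Returns:
--         list of int: The indices corresponding to the window each AI time stamp falls into.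
--     """
--     indices = []
--     for ai_time in ai_time_starts:
--         found = False
--         # Loop through intervals defined by consecutive user time stamps
--         for idx in range(len(user_time_starts) - 1):
--             if user_time_starts[idx] < ai_time < user_time_starts[idx+1]:
--                 indices.append(idx)
--                 found = True
--                 break
--         if not found:
--             # If ai_time is greater than or equal to the last user time stamp, assign last index.
--             if ai_time >= user_time_starts[-1]:
--                 indices.append(len(user_time_starts) - 1)
--             else:
--                 # Optionally handle the case where ai_time is less than the first user time stamp.
--                 indices.append(0)
--     return indices
-- ===== SOURCE B (Python) =====
-- def find_ai_speaks_idx(ai_time_starts, user_time_starts):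
--     # Interval-major pass: sweep the user windows once, tagging every still-unresolved
--     # AI time that falls strictly inside the current window; then fill the leftovers.
--     slots = [(t, None) for t in ai_time_starts]
--     for idx in range(len(user_time_starts) - 1):
--         lo = user_time_starts[idx]
--         hi = user_time_starts[idx + 1]
--         slots = [(t, idx if r is None and lo < t < hi else r) for (t, r) in slots]
--     out = []
--     for t, r in slots:
--         if r is not None:
--             out.append(r)
--         elif t >= user_time_starts[-1]:
--             out.append(len(user_time_starts) - 1)
--         else:
--             out.append(0)
--     return out
-- ===== Notes on version B (the rewrite author's own statement) =====
-- stated objective: alternative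
-- what changed: B transposes the traversal: instead of A's query-major scan (for each AI time, scan the user windows until the first strict hit), B sweeps the user windows once in interval-major order, tagging every still-unresolved AI time whose value lies strictly inside the current window, then fills leftovers with the last-index/0 rule.
import Mathlib
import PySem

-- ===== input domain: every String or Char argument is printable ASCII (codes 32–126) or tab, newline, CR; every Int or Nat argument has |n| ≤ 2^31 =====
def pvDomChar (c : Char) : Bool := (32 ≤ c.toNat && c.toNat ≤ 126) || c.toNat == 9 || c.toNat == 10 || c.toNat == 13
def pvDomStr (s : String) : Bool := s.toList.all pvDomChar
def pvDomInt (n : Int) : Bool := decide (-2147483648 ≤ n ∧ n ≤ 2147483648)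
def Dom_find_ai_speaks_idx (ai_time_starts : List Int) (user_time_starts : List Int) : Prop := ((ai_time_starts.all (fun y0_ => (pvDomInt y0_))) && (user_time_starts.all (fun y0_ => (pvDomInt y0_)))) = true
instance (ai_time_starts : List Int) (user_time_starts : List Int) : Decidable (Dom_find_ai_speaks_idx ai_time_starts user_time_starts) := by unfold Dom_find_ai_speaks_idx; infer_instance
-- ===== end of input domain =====

-- B transposes A's query-major scan into a single interval-major sweep over the user
-- windows (tagging still-unresolved AI times), same O(n*m) cost, no speed claim.

-- ===== PORT A =====
def find_ai_speaks_idx (ai_time_starts : List Int) (user_time_starts : List Int) : List Int :=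
  ai_time_starts.foldl (fun indices ai_time =>
    let s := (PySem.List.pyRange 0 ((user_time_starts.length : Int) - 1) 1).foldl
      (fun (st : List Int × Bool) idx =>
        if st.2 then st   -- 'break': once found, the rest of the loop does nothing
        else
          match PySem.List.pyGet? user_time_starts idx, PySem.List.pyGet? user_time_starts (idx + 1) with
          | some a, some b => if a < ai_time ∧ ai_time < b then (st.1 ++ [idx], true) else st
          | _, _ => st)
      (indices, false)
    if s.2 then s.1
    else
      match PySem.List.pyGet? user_time_starts (-1) with
      | some last => if last ≤ ai_time then s.1 ++ [(user_time_starts.length : Int) - 1] else s.1 ++ [0]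
      | none => s.1)   -- user_time_starts[-1] raises IndexError here (excluded by Pre_)
    []

-- ===== PORT B =====
def find_ai_speaks_idx_alt (ai_time_starts : List Int) (user_time_starts : List Int) : List Int :=
  let slots0 : List (Int × Option Int) := ai_time_starts.map (fun t => (t, none))
  let slots := (PySem.List.pyRange 0 ((user_time_starts.length : Int) - 1) 1).foldl
    (fun slots idx =>
      match PySem.List.pyGet? user_time_starts idx with
      | some lo =>
        match PySem.List.pyGet? user_time_starts (idx + 1) with
        | some hi =>
            slots.map (fun (p : Int × Option Int) =>
              (p.1, if p.2 = none ∧ lo < p.1 ∧ p.1 < hi then some idx else p.2))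
        | none => slots
      | none => slots)
    slots0
  slots.foldl (fun out p =>
    match p.2 with
    | some r => out ++ [r]
    | none =>
      match PySem.List.pyGet? user_time_starts (-1) with
      | some last => if last ≤ p.1 then out ++ [(user_time_starts.length : Int) - 1] else out ++ [0]
      | none => out ++ [0])   -- user_time_starts[-1] raises IndexError here (excluded by Pre_)
    []

-- ===== PRECONDITION & SPEC =====
-- Pre_ excludes only the inputs on which A raises IndexError: a nonempty AI list with an
-- empty user list (user_time_starts[-1] fails there).
def Pre_find_ai_speaks_idx (ai_time_starts : List Int) (user_time_starts : List Int) : Prop :=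
  ai_time_starts = [] ∨ user_time_starts ≠ []
instance (ai_time_starts : List Int) (user_time_starts : List Int) : Decidable (Pre_find_ai_speaks_idx ai_time_starts user_time_starts) := by unfold Pre_find_ai_speaks_idx; infer_instance

def pvWitness_find_ai_speaks_idx : List Int × List Int := ([1, 5, -3], [0, 2, 4])

def Spec_find_ai_speaks_idx (ai_time_starts : List Int) (user_time_starts : List Int) (out : List Int) : Prop := out = find_ai_speaks_idx_alt ai_time_starts user_time_starts
instance (ai_time_starts : List Int) (user_time_starts : List Int) (out : List Int) : Decidable (Spec_find_ai_speaks_idx ai_time_starts user_time_starts out) := by unfold Spec_find_ai_speaks_idx; infer_instance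

-- ===== CLAIM (what is proved, stated in full; the proofs are below) =====
def Claim_equal_find_ai_speaks_idx : Prop := ∀ (ai_time_starts : List Int) (user_time_starts : List Int), Dom_find_ai_speaks_idx ai_time_starts user_time_starts → Pre_find_ai_speaks_idx ai_time_starts user_time_starts → Spec_find_ai_speaks_idx ai_time_starts user_time_starts (find_ai_speaks_idx ai_time_starts user_time_starts)

-- ===== LEMMAS AND PROOFS =====

/-- Whether interval `idx` of `u` strictly contains `t` (with the ports' out-of-range guard). -/
def pvHit (u : List Int) (t idx : Int) : Bool :=
  match PySem.List.pyGet? u idx, PySem.List.pyGet? u (idx + 1) with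
  | some lo, some hi => decide (lo < t ∧ t < hi)
  | _, _ => false

/-- Per-query step of B's interval sweep, specialised to one slot. -/
def pvQ (u : List Int) (t : Int) (s : Option Int) (idx : Int) : Option Int :=
  match PySem.List.pyGet? u idx with
  | some lo =>
    match PySem.List.pyGet? u (idx + 1) with
    | some hi => if s = none ∧ lo < t ∧ t < hi then some idx else s
    | none => s
  | none => s

/-- The trailing (not-found) rule, shared by both ports when `u ≠ []`. -/
def pvTail (u : List Int) (last t : Int) : List Int :=
  if last ≤ t then [(u.length : Int) - 1] else [0]

/-- A's inner step function. -/
def pvStepA (u : List Int) (t : Int) (st : List Int × Bool) (idx : Int) : List Int × Bool :=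
  if st.2 then st
  else
    match PySem.List.pyGet? u idx, PySem.List.pyGet? u (idx + 1) with
    | some a, some b => if a < t ∧ t < b then (st.1 ++ [idx], true) else st
    | _, _ => st

lemma pvStepA_false (u : List Int) (t : Int) (acc : List Int) (i : Int) :
    pvStepA u t (acc, false) i = if pvHit u t i then (acc ++ [i], true) else (acc, false) := by
  unfold pvStepA pvHit
  rcases h1 : PySem.List.pyGet? u i with _ | a <;>
    rcases h2 : PySem.List.pyGet? u (i + 1) with _ | b <;> simp

lemma pvFoldA_true (u : List Int) (t : Int) :
    ∀ (r : List Int) (x : List Int × Bool), x.2 = true → r.foldl (pvStepA u t) x = x := by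
  intro r
  induction r with
  | nil => intro x _; rfl
  | cons a r ih =>
    intro x hx
    simp only [List.foldl_cons]
    rw [show pvStepA u t x a = x by unfold pvStepA; simp [hx]]
    exact ih x hx

lemma pvFoldA (u : List Int) (t : Int) :
    ∀ (r : List Int) (acc : List Int),
      r.foldl (pvStepA u t) (acc, false) =
        match r.find? (pvHit u t) with
        | some i => (acc ++ [i], true)
        | none => (acc, false) := by
  intro r
  induction r with
  | nil => intro acc; rfl
  | cons a r ih =>
    intro acc
    simp only [List.foldl_cons, pvStepA_false, List.find?]
    by_cases h : pvHit u t a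
    · simp [h, pvFoldA_true u t r (acc ++ [a], true) rfl]
    · simp [h, ih acc]

lemma pvQ_some (u : List Int) (t x i : Int) : pvQ u t (some x) i = some x := by
  unfold pvQ
  rcases PySem.List.pyGet? u i with _ | a <;> rcases PySem.List.pyGet? u (i + 1) with _ | b <;> simp

lemma pvQ_none (u : List Int) (t i : Int) :
    pvQ u t none i = if pvHit u t i then some i else none := by
  unfold pvQ pvHit
  rcases h1 : PySem.List.pyGet? u i with _ | a <;>
    rcases h2 : PySem.List.pyGet? u (i + 1) with _ | b <;> simp

lemma pvFoldQ_some (u : List Int) (t x : Int) :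
    ∀ (r : List Int), r.foldl (pvQ u t) (some x) = some x := by
  intro r
  induction r with
  | nil => rfl
  | cons a r ih => simp only [List.foldl_cons, pvQ_some]; exact ih

lemma pvFoldQ (u : List Int) (t : Int) :
    ∀ (r : List Int), r.foldl (pvQ u t) none = r.find? (pvHit u t) := by
  intro r
  induction r with
  | nil => rfl
  | cons a r ih =>
    simp only [List.foldl_cons, pvQ_none, List.find?]
    by_cases h : pvHit u t a
    · simp [h, pvFoldQ_some]
    · simp [h, ih]

/-- B's per-interval step function over the whole slot list. -/
def pvStepB (u : List Int) (slots : List (Int × Option Int)) (idx : Int) : List (Int × Option Int) :=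
  match PySem.List.pyGet? u idx with
  | some lo =>
    match PySem.List.pyGet? u (idx + 1) with
    | some hi =>
        slots.map (fun (p : Int × Option Int) =>
          (p.1, if p.2 = none ∧ lo < p.1 ∧ p.1 < hi then some idx else p.2))
    | none => slots
  | none => slots

lemma pvStepB_map (u : List Int) (l : List Int) (g : Int → Option Int) (i : Int) :
    pvStepB u (l.map (fun t => (t, g t))) i = l.map (fun t => (t, pvQ u t (g t) i)) := by
  unfold pvStepB pvQ
  rcases h1 : PySem.List.pyGet? u i with _ | lo <;>
    rcases h2 : PySem.List.pyGet? u (i + 1) with _ | hi <;> simp [List.map_map, Function.comp]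

lemma pvFoldB_map (u : List Int) :
    ∀ (r : List Int) (l : List Int) (g : Int → Option Int),
      r.foldl (pvStepB u) (l.map (fun t => (t, g t))) =
        l.map (fun t => (t, r.foldl (pvQ u t) (g t))) := by
  intro r
  induction r with
  | nil => intro l g; rfl
  | cons a r ih =>
    intro l g
    simp only [List.foldl_cons, pvStepB_map]
    exact ih l (fun t => pvQ u t (g t) a)

lemma pvA_eq (u : List Int) (last : Int)
    (hlast : PySem.List.pyGet? u (-1) = some last) (ai : List Int) :
    find_ai_speaks_idx ai u =
      ai.foldl (fun acc t =>
        acc ++ (match (PySem.List.pyRange 0 ((u.length : Int) - 1) 1).find? (pvHit u t) with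
                | some i => [i]
                | none => pvTail u last t)) [] := by
  unfold find_ai_speaks_idx
  congr 1
  funext acc t
  show (if ((PySem.List.pyRange 0 ((u.length : Int) - 1) 1).foldl (pvStepA u t) (acc, false)).2
        then ((PySem.List.pyRange 0 ((u.length : Int) - 1) 1).foldl (pvStepA u t) (acc, false)).1
        else
          match PySem.List.pyGet? u (-1) with
          | some l => if l ≤ t
              then ((PySem.List.pyRange 0 ((u.length : Int) - 1) 1).foldl (pvStepA u t) (acc, false)).1 ++ [(u.length : Int) - 1]
              else ((PySem.List.pyRange 0 ((u.length : Int) - 1) 1).foldl (pvStepA u t) (acc, false)).1 ++ [0]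
          | none => ((PySem.List.pyRange 0 ((u.length : Int) - 1) 1).foldl (pvStepA u t) (acc, false)).1)
      = acc ++ (match (PySem.List.pyRange 0 ((u.length : Int) - 1) 1).find? (pvHit u t) with
                | some i => [i]
                | none => pvTail u last t)
  rw [pvFoldA]
  rcases hf : (PySem.List.pyRange 0 ((u.length : Int) - 1) 1).find? (pvHit u t) with _ | i
  · simp only [Bool.false_eq_true, if_false, hlast, pvTail]
    split_ifs <;> rfl
  · rfl

lemma pvB_eq (u : List Int) (last : Int)
    (hlast : PySem.List.pyGet? u (-1) = some last) (ai : List Int) :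
    find_ai_speaks_idx_alt ai u =
      ai.foldl (fun acc t =>
        acc ++ (match (PySem.List.pyRange 0 ((u.length : Int) - 1) 1).find? (pvHit u t) with
                | some i => [i]
                | none => pvTail u last t)) [] := by
  unfold find_ai_speaks_idx_alt
  show ((PySem.List.pyRange 0 ((u.length : Int) - 1) 1).foldl (pvStepB u)
          (ai.map (fun t => (t, (none : Option Int))))).foldl
        (fun out p =>
          match p.2 with
          | some r => out ++ [r]
          | none =>
            match PySem.List.pyGet? u (-1) with
            | some l => if l ≤ p.1 then out ++ [(u.length : Int) - 1] else out ++ [0]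
            | none => out ++ [0]) []
      = _
  rw [pvFoldB_map u _ ai (fun _ => none), List.foldl_map]
  congr 1
  funext acc t
  show (match ((t, (PySem.List.pyRange 0 ((u.length : Int) - 1) 1).foldl (pvQ u t) none) : Int × Option Int).2 with
        | some r => acc ++ [r]
        | none =>
          match PySem.List.pyGet? u (-1) with
          | some l => if l ≤ t then acc ++ [(u.length : Int) - 1] else acc ++ [0]
          | none => acc ++ [0])
      = acc ++ (match (PySem.List.pyRange 0 ((u.length : Int) - 1) 1).find? (pvHit u t) with
                | some i => [i]
                | none => pvTail u last t)
  simp only [pvFoldQ]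
  rcases hf : (PySem.List.pyRange 0 ((u.length : Int) - 1) 1).find? (pvHit u t) with _ | i
  · simp only [hlast, pvTail]
    split_ifs <;> rfl
  · rfl

lemma pvAlt_nil (u : List Int) : find_ai_speaks_idx_alt [] u = [] := by
  have h0 := pvFoldB_map u (PySem.List.pyRange 0 ((u.length : Int) - 1) 1) [] (fun _ => none)
  simp only [List.map_nil] at h0
  unfold find_ai_speaks_idx_alt
  show ((PySem.List.pyRange 0 ((u.length : Int) - 1) 1).foldl (pvStepB u)
          (([] : List Int).map (fun t => (t, (none : Option Int))))).foldl _ [] = []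
  rw [List.map_nil, h0]
  rfl

-- ===== VERDICT (by name: the statement is the Claim_ definition above) =====
theorem find_ai_speaks_idx_spec : Claim_equal_find_ai_speaks_idx := by
  intro ai u _ hpre
  unfold Spec_find_ai_speaks_idx
  rcases hpre with hai | hu
  · subst hai; exact (pvAlt_nil u).symm
  · obtain ⟨last, hlast⟩ : ∃ x, PySem.List.pyGet? u (-1) = some x := by
      rw [PySem.List.pyGet?_neg_one]
      exact Option.isSome_iff_exists.mp (List.getLast?_isSome.mpr hu)
    rw [pvA_eq u last hlast ai, pvB_eq u last hlast ai]
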